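-- pv_equiv track=rewrite | github.com/dobin/godot-srcvis | parsing/utils.py | find_word_before_string
-- ===== SOURCE A (Python) =====
-- def find_word_before_string(input_string, target_string):
--     index = input_string.rfind(target_string)
--     if index != -1:
--         i = index - 1
--         while i >= 0 and not input_string[i].isspace():
--             i -= 1
--         word_before = input_string[i + 1:index].strip()
--         if word_before:
--             return word_before
--     return None
-- ===== SOURCE B (Python) =====
-- def find_word_before_string(input_string, target_string):
--     index = input_string.rfind(target_string)
--     if index <= 0 or input_string[index - 1].isspace():
--         return None
--     word = ''
--     for ch in input_string[:index]:
--         word = '' if ch.isspace() else word + ch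
--     return word
-- ===== Notes on version B (the rewrite author's own statement) =====
-- stated objective: alternative
-- what changed: A walks backward character by character from the match, slices the word out and strips it; B checks the adjacency condition up front and finds the word in a single forward pass over the prefix that accumulates the current word and resets it at every whitespace character.
import Mathlib
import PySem

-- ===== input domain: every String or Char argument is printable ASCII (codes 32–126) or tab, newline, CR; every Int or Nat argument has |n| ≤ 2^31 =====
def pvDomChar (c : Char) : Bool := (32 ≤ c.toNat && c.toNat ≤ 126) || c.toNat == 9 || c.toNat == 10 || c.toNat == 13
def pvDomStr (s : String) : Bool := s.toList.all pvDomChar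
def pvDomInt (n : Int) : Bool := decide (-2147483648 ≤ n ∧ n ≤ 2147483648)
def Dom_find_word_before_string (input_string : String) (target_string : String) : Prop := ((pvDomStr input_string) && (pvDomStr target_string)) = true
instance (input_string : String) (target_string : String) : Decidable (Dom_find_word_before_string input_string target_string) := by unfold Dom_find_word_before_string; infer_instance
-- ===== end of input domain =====

-- B replaces A's backward character walk + slice + strip by a single forward pass that
-- re-accumulates the current word and resets it at whitespace (objective: alternative).

-- ===== PORT A =====
-- the 'while i >= 0 and not input_string[i].isspace(): i -= 1' loop of A
def pvWalkA (cs : List Char) (i : Int) : Int :=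
  if h : 0 ≤ i ∧ PySem.Chars.isspace (PySem.List.pyGetD cs i ' ') = false then
    pvWalkA cs (i - 1)
  else i
termination_by (i + 1).toNat
decreasing_by omega

def find_word_before_string (input_string : String) (target_string : String) : Option String :=
  let cs := input_string.toList
  let index := PySem.Str.rfind input_string target_string
  if index ≠ -1 then
    let i := pvWalkA cs (index - 1)
    let word_before := PySem.Chars.strip (PySem.List.slice cs (some (i + 1)) (some index))
    if word_before ≠ [] then some (String.ofList word_before) else none
  else none

-- ===== PORT B =====
-- body of B's for-loop: word = '' if ch.isspace() else word + ch
def pvAccWord (w : List Char) (c : Char) : List Char :=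
  if PySem.Chars.isspace c then [] else w ++ [c]

def find_word_before_string_alt (input_string : String) (target_string : String) : Option String :=
  let cs := input_string.toList
  let index := PySem.Str.rfind input_string target_string
  if index ≤ 0 || PySem.Chars.isspace (PySem.List.pyGetD cs (index - 1) ' ') then none
  else some (String.ofList ((PySem.List.slice cs none (some index)).foldl pvAccWord []))

-- ===== PRECONDITION & SPEC =====
def Spec_find_word_before_string (input_string : String) (target_string : String) (out : Option String) : Prop := out = find_word_before_string_alt input_string target_string
instance (input_string : String) (target_string : String) (out : Option String) : Decidable (Spec_find_word_before_string input_string target_string out) := by unfold Spec_find_word_before_string; infer_instance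

-- ===== CLAIM (what is proved, stated in full; the proofs are below) =====
def Claim_equal_find_word_before_string : Prop := ∀ (input_string : String) (target_string : String), Dom_find_word_before_string input_string target_string → Spec_find_word_before_string input_string target_string (find_word_before_string input_string target_string)

-- ===== LEMMAS AND PROOFS =====

-- rfind's result is -1 or a position in [0, |s|]
theorem pvRfindGo_bounds (s sub : List Char) (k : Nat) :
    -1 ≤ PySem.Chars.rfind.go s sub k ∧ PySem.Chars.rfind.go s sub k ≤ (k : Int) := by
  induction k with
  | zero => unfold PySem.Chars.rfind.go; split <;> simp
  | succ j ih =>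
    unfold PySem.Chars.rfind.go
    split
    · constructor <;> omega
    · exact ⟨ih.1, by omega⟩

theorem pvRfind_bounds (s sub : List Char) :
    -1 ≤ PySem.Chars.rfind s sub ∧ PySem.Chars.rfind s sub ≤ (s.length : Int) := by
  simpa [PySem.Chars.rfind] using pvRfindGo_bounds s sub s.length

theorem pvWalkA_le (cs : List Char) (i : Int) : pvWalkA cs i ≤ i := by
  induction i using pvWalkA.induct cs with
  | case1 i h ih => rw [pvWalkA, dif_pos h]; omega
  | case2 i h => rw [pvWalkA, dif_neg h]

theorem pvWalkA_ge (cs : List Char) (i : Int) (hi : -1 ≤ i) : -1 ≤ pvWalkA cs i := by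
  induction i using pvWalkA.induct cs with
  | case1 i h ih => rw [pvWalkA, dif_pos h]; exact ih (by omega)
  | case2 i h => rw [pvWalkA, dif_neg h]; omega

-- every char of B's accumulator is non-space
theorem pvAcc_nonspace (l : List Char) (w : List Char)
    (hw : ∀ c ∈ w, PySem.Chars.isspace c = false) :
    ∀ c ∈ l.foldl pvAccWord w, PySem.Chars.isspace c = false := by
  induction l generalizing w with
  | nil => simpa using hw
  | cons a l ih =>
    simp only [List.foldl_cons]
    apply ih
    unfold pvAccWord
    split
    · simp
    · intro c hc
      rcases List.mem_append.1 hc with h | h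
      · exact hw c h
      · simp_all

theorem pvDropWhile_eq_self (p : Char → Bool) (l : List Char)
    (h : ∀ c ∈ l, p c = false) : List.dropWhile p l = l := by
  cases l with
  | nil => simp
  | cons a l => simp [h a (by simp)]

theorem pvStrip_of_nonspace (l : List Char)
    (h : ∀ c ∈ l, PySem.Chars.isspace c = false) : PySem.Chars.strip l = l := by
  unfold PySem.Chars.strip PySem.Chars.lstrip PySem.Chars.rstrip
  rw [pvDropWhile_eq_self _ _ h, pvDropWhile_eq_self _ _ (by simpa using h), List.reverse_reverse]

-- the last character of 'take n' (0 < n ≤ |cs|)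
theorem pvTake_concat (cs : List Char) (n : Nat) (h0 : 0 < n) (hn : n ≤ cs.length) :
    cs.take n = cs.take (n - 1) ++ [cs[n - 1]'(by omega)] := by
  conv_lhs => rw [show n = (n - 1) + 1 by omega]
  rw [List.take_add_one, List.getElem?_eq_getElem (by omega)]
  simp

-- core invariant: A's slice from the walk position equals B's forward fold over the prefix
theorem pvMain (cs : List Char) (n : Nat) (hn : n ≤ cs.length) :
    PySem.List.slice cs (some (pvWalkA cs ((n : Int) - 1) + 1)) (some (n : Int)) =
      (cs.take n).foldl pvAccWord [] := by
  induction n with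
  | zero =>
    simp only [Nat.cast_zero]
    rw [pvWalkA, dif_neg (by simp)]
    rw [show (0 : Int) - 1 + 1 = 0 by ring]
    rw [PySem.List.slice_toNat cs le_rfl le_rfl]
    simp
  | succ n ih =>
    have hlt : n < cs.length := by omega
    have hget : PySem.List.pyGetD cs ((n : Int)) ' ' = cs[n] := by
      simp [PySem.List.pyGetD_natCast, List.getD_eq_getElem?_getD, hlt]
    rw [show ((n + 1 : Nat) : Int) = (n : Int) + 1 by push_cast; ring,
        show (n : Int) + 1 - 1 = (n : Int) by ring]
    rw [pvTake_concat cs (n + 1) (by omega) (by omega)]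
    simp only [Nat.add_sub_cancel, List.foldl_append, List.foldl_cons, List.foldl_nil]
    by_cases hsp : PySem.Chars.isspace cs[n] = true
    · rw [pvWalkA, dif_neg (by simp [hget, hsp])]
      rw [show (n : Int) + 1 = ((n + 1 : Nat) : Int) by push_cast; ring]
      rw [PySem.List.slice_natCast]
      simp [pvAccWord, hsp]
    · rw [pvWalkA, dif_pos ⟨by omega, by rw [hget]; simpa using hsp⟩]
      rw [← ih (by omega)]
      have hw1 : pvWalkA cs ((n : Int) - 1) ≤ (n : Int) - 1 := pvWalkA_le cs _
      have hw2 : -1 ≤ pvWalkA cs ((n : Int) - 1) := pvWalkA_ge cs _ (by omega)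
      set a : Int := pvWalkA cs ((n : Int) - 1) + 1 with ha
      have h0a : 0 ≤ a := by omega
      rw [PySem.List.slice_toNat cs h0a (by omega), PySem.List.slice_toNat cs h0a (by omega)]
      have hts : ((n : Int) + 1).toNat - a.toNat = ((n : Int).toNat - a.toNat) + 1 := by omega
      rw [hts, List.take_add_one, List.getElem?_drop]
      rw [show a.toNat + ((n : Int).toNat - a.toNat) = n by omega]
      rw [List.getElem?_eq_getElem hlt]
      simp [pvAccWord, hsp]

-- the whole equivalence, stated over the character list and the found index
theorem pvCore (cs : List Char) (index : Int) (hge : -1 ≤ index) (hle : index ≤ (cs.length : Int)) :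
    (if index ≠ -1 then
       (let i := pvWalkA cs (index - 1);
        let word_before := PySem.Chars.strip (PySem.List.slice cs (some (i + 1)) (some index));
        if word_before ≠ [] then some (String.ofList word_before) else none)
     else none)
    = (if index ≤ 0 ∨ PySem.Chars.isspace (PySem.List.pyGetD cs (index - 1) ' ') = true then none
       else some (String.ofList ((PySem.List.slice cs none (some index)).foldl pvAccWord []))) := by
  by_cases hneg : index = -1
  · rw [if_neg (by simp [hneg]), if_pos (by left; omega)]
  · obtain ⟨n, hn⟩ : ∃ m : Nat, index = (m : Int) := ⟨index.toNat, by omega⟩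
    subst hn
    have hnlen : n ≤ cs.length := by exact_mod_cast hle
    rw [if_pos hneg]
    show (if PySem.Chars.strip (PySem.List.slice cs (some (pvWalkA cs ((n : Int) - 1) + 1)) (some (n : Int))) ≠ []
          then some (String.ofList (PySem.Chars.strip (PySem.List.slice cs (some (pvWalkA cs ((n : Int) - 1) + 1)) (some (n : Int)))))
          else none) = _
    by_cases h0 : n = 0
    · subst h0
      simp only [Nat.cast_zero]
      rw [pvWalkA, dif_neg (by simp)]
      rw [show (0 : Int) - 1 + 1 = 0 by ring]
      rw [PySem.List.slice_toNat cs le_rfl le_rfl]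
      simp only [Int.toNat_zero, Nat.sub_self, List.take_zero]
      rw [pvStrip_of_nonspace [] (by simp)]
      rw [if_neg (by simp), if_pos (Or.inl le_rfl)]
    · have hnpos : 0 < n := by omega
      have hlt : n - 1 < cs.length := by omega
      have hgetB : PySem.List.pyGetD cs ((n : Int) - 1) ' ' = cs[n - 1] := by
        rw [show (n : Int) - 1 = ((n - 1 : Nat) : Int) by omega]
        simp [PySem.List.pyGetD_natCast, List.getD_eq_getElem?_getD, hlt]
      have hmain := pvMain cs n hnlen
      have hstrip := pvStrip_of_nonspace ((cs.take n).foldl pvAccWord []) (pvAcc_nonspace _ _ (by simp))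
      by_cases hsp : PySem.Chars.isspace cs[n - 1] = true
      · -- the character before the target is whitespace: both sides give none
        have hempty : (cs.take n).foldl pvAccWord [] = [] := by
          rw [pvTake_concat cs n hnpos hnlen]
          simp only [List.foldl_append, List.foldl_cons, List.foldl_nil]
          unfold pvAccWord
          rw [if_pos hsp]
        have hAword : PySem.Chars.strip (PySem.List.slice cs (some (pvWalkA cs ((n : Int) - 1) + 1)) (some (n : Int))) = [] := by
          rw [hmain, hempty]
          rfl
        rw [hAword, if_neg (by simp), if_pos (Or.inr (by rw [hgetB]; exact hsp))]
      · have hAword : PySem.Chars.strip (PySem.List.slice cs (some (pvWalkA cs ((n : Int) - 1) + 1)) (some (n : Int))) = (cs.take n).foldl pvAccWord [] := by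
          rw [hmain]; exact hstrip
        have hne : (cs.take n).foldl pvAccWord [] ≠ [] := by
          rw [pvTake_concat cs n hnpos hnlen]
          simp only [List.foldl_append, List.foldl_cons, List.foldl_nil]
          unfold pvAccWord
          rw [if_neg hsp]
          simp
        have hcond : ¬((n : Int) ≤ 0 ∨ PySem.Chars.isspace (PySem.List.pyGetD cs ((n : Int) - 1) ' ') = true) := by
          rw [hgetB]
          rintro (h | h)
          · omega
          · exact hsp h
        rw [hAword, if_pos hne, if_neg hcond]
        rw [PySem.List.slice_to cs (show (0 : Int) ≤ (n : Int) by omega)]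
        simp

-- ===== VERDICT (by name: the statement is the Claim_ definition above) =====
theorem find_word_before_string_spec : Claim_equal_find_word_before_string := by
  intro s t _
  unfold Spec_find_word_before_string
  show find_word_before_string s t = find_word_before_string_alt s t
  have hb := pvRfind_bounds s.toList t.toList
  have := pvCore s.toList (PySem.Str.rfind s t)
    (by rw [PySem.Str.rfind_eq]; exact hb.1) (by rw [PySem.Str.rfind_eq]; exact hb.2)
  simpa [find_word_before_string, find_word_before_string_alt, Bool.or_eq_true,
    decide_eq_true_eq] using this
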